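-- pv_equiv track=rewrite | github.com/offero/hackerrank | picking_cards_scrap.py | count_perms3
-- ===== SOURCE A (Python) =====
-- def count_perms3(vals):
--     from collections import Counter
--     cntr = Counter(vals)
--     cards = 0
--     total = 1
--     for i in range(len(vals)):
--         cards += cntr[i]
--         if cards <= i:
--             return 0
--         total = (total * (cards-i)) % 1000000007
--     return total
-- ===== SOURCE B (Python) =====
-- def count_perms3(vals):
--     s = sorted(vals)
--     n = len(vals)
--     total = 1
--     cards = 0
--     j = 0
--     for i in range(n):
--         while j < n and s[j] < i:
--             j += 1
--         while j < n and s[j] == i: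
--             j += 1
--             cards += 1
--         if cards <= i:
--             return 0
--         total = total * (cards - i) % 1000000007
--     return total
-- ===== Notes on version B (the rewrite author's own statement) =====
-- stated objective: alternative
-- what changed: Replaces the Counter hash-map with a sort-then-two-pointer sweep over the sorted values: a pointer skips elements below i and counts elements equal to i, so no dictionary is built and no per-iteration hash lookups occur.
import Mathlib
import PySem

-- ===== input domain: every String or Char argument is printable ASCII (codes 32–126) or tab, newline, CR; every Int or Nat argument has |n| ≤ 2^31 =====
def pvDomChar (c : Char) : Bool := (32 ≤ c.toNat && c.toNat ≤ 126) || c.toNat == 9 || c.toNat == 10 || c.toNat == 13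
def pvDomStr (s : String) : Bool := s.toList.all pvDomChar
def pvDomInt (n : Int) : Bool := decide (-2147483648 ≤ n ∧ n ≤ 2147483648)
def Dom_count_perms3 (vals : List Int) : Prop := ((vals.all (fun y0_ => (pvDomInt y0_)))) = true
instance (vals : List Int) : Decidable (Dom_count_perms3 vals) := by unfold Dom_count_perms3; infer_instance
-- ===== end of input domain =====

-- B replaces A's Counter lookups by a sort-then-two-pointer sweep (alternative decomposition, same results).

-- ===== PORT A =====
-- the 'for i in range(n)' loop with early 'return 0', state (cards, total)
def countPerms3LoopA (cntr : PySem.Dict Int Int) : List Int → Int → Int → Int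
  | [], _, total => total
  | i :: is, cards, total =>
    let cards := cards + cntr.getD i 0
    if cards ≤ i then 0
    else countPerms3LoopA cntr is cards (PySem.Int.mod (total * (cards - i)) 1000000007)

def count_perms3 (vals : List Int) : Int :=
  countPerms3LoopA (PySem.Dict.counter vals) (PySem.List.pyRange 0 (vals.length : Int) 1) 0 1

-- ===== PORT B =====
-- the pointer j into the sorted list is represented by the remaining suffix 'rest';
-- the first while loop is a dropWhile, the second a takeWhile/dropWhile pair
def countPerms3LoopB : List Int → List Int → Int → Int → Int
  | [], _, _, total => total
  | i :: is, rest, cards, total =>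
    let rest := rest.dropWhile (fun v => decide (v < i))
    let cards := cards + ((rest.takeWhile (fun v => v == i)).length : Int)
    let rest := rest.dropWhile (fun v => v == i)
    if cards ≤ i then 0
    else countPerms3LoopB is rest cards (PySem.Int.mod (total * (cards - i)) 1000000007)

def count_perms3_alt (vals : List Int) : Int :=
  countPerms3LoopB (PySem.List.pyRange 0 (vals.length : Int) 1)
    (PySem.List.sorted vals (fun x => x) false) 0 1

-- ===== PRECONDITION & SPEC =====
def Spec_count_perms3 (vals : List Int) (out : Int) : Prop := out = count_perms3_alt vals
instance (vals : List Int) (out : Int) : Decidable (Spec_count_perms3 vals out) := by unfold Spec_count_perms3; infer_instance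

-- ===== CLAIM (what is proved, stated in full; the proofs are below) =====
def Claim_equal_count_perms3 : Prop := ∀ (vals : List Int), Dom_count_perms3 vals → Spec_count_perms3 vals (count_perms3 vals)

-- ===== LEMMAS AND PROOFS =====

-- a list all of whose elements are ≥ t is unchanged by 'filter (t ≤ ·)'
theorem pv_filter_ge_eq_self (l : List Int) (t : Int) (h : ∀ v ∈ l, t ≤ v) :
    l.filter (fun v => decide (t ≤ v)) = l := by
  rw [List.filter_eq_self]
  intro a ha; simpa using h a ha

-- on a sorted list, dropping the elements below i from the elements ≥ t (t ≤ i) leaves the elements ≥ i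
theorem pv_dropWhile_lt (s : List Int) (hs : s.Pairwise (· ≤ ·)) (t i : Int) (ht : t ≤ i) :
    (s.filter (fun v => decide (t ≤ v))).dropWhile (fun v => decide (v < i))
      = s.filter (fun v => decide (i ≤ v)) := by
  induction s with
  | nil => simp
  | cons a tl ih =>
    rcases List.pairwise_cons.mp hs with ⟨ha, htl⟩
    by_cases hai : a < i
    · have hlt : ¬ i ≤ a := by omega
      by_cases hta : t ≤ a
      · simp [hta, hai, hlt, ih htl]
      · simp [hta, hlt, ih htl]
    · have hta : t ≤ a := by omega
      have hia : i ≤ a := by omega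
      have h1 : tl.filter (fun v => decide (t ≤ v)) = tl :=
        pv_filter_ge_eq_self tl t (fun v hv => le_trans hta (ha v hv))
      have h2 : tl.filter (fun v => decide (i ≤ v)) = tl :=
        pv_filter_ge_eq_self tl i (fun v hv => le_trans hia (ha v hv))
      simp [hta, hai, hia, h1, h2]

-- on a sorted list all of whose elements are ≥ i, the leading run of i's has length (count i)
theorem pv_takeWhile_len (l : List Int) (hs : l.Pairwise (· ≤ ·)) (i : Int)
    (h : ∀ v ∈ l, i ≤ v) : (l.takeWhile (fun v => v == i)).length = l.count i := by
  induction l with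
  | nil => simp
  | cons a tl ih =>
    rcases List.pairwise_cons.mp hs with ⟨ha, htl⟩
    by_cases hai : a = i
    · subst hai
      simp [ih htl (fun v hv => h v (List.mem_cons_of_mem _ hv))]
    · have hia : i < a := lt_of_le_of_ne (h a (List.mem_cons_self)) (Ne.symm hai)
      have hnot : i ∉ a :: tl := by
        intro hmem
        rcases List.mem_cons.mp hmem with h1 | h1
        · omega
        · have := ha i h1; omega
      simp [hai, List.count_eq_zero.mpr hnot]

-- on a sorted list all of whose elements are ≥ i, dropping the leading i's leaves the elements ≥ i+1
theorem pv_dropWhile_eq (l : List Int) (hs : l.Pairwise (· ≤ ·)) (i : Int)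
    (h : ∀ v ∈ l, i ≤ v) :
    l.dropWhile (fun v => v == i) = l.filter (fun v => decide (i + 1 ≤ v)) := by
  induction l with
  | nil => simp
  | cons a tl ih =>
    rcases List.pairwise_cons.mp hs with ⟨ha, htl⟩
    by_cases hai : a = i
    · subst hai
      have : ¬ (a + 1 ≤ a) := by omega
      simp [ih htl (fun v hv => h v (List.mem_cons_of_mem _ hv))]
    · have hia : i + 1 ≤ a := by
        have := h a (List.mem_cons_self); omega
      have h1 : tl.filter (fun v => decide (i < v)) = tl := by
        rw [List.filter_eq_self]
        intro v hv
        have := ha v hv; simp; omega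
      have hia2 : i < a := by omega
      simp [hai, hia2, h1]

-- main loop correspondence: both loops keep the same (cards, total) state
theorem pv_main (s cv : List Int) (hs : s.Pairwise (· ≤ ·)) (hperm : s.Perm cv) :
    ∀ (k : Nat) (i t cards total : Int), t ≤ i →
      countPerms3LoopA (PySem.Dict.counter cv) (PySem.List.pyRange i (i + k) 1) cards total
        = countPerms3LoopB (PySem.List.pyRange i (i + k) 1)
            (s.filter (fun v => decide (t ≤ v))) cards total := by
  intro k
  induction k with
  | zero =>
    intro i t cards total ht
    rw [PySem.List.pyRange_one_eq_nil (by omega)]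
    rfl
  | succ k ih =>
    intro i t cards total ht
    rw [PySem.List.pyRange_one_cons (by omega : i < i + (k + 1 : Nat))]
    have hge : ∀ v ∈ s.filter (fun v => decide (i ≤ v)), i ≤ v := by
      intro v hv; simpa using (List.mem_filter.mp hv).2
    have hsort : (s.filter (fun v => decide (i ≤ v))).Pairwise (· ≤ ·) := hs.filter _
    have hcntA : (PySem.Dict.counter cv).getD i 0 = (cv.count i : Int) :=
      PySem.Dict.getD_counter cv i
    have hcntB : ((s.filter (fun v => decide (i ≤ v))).takeWhile (fun v => v == i)).length
        = cv.count i := by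
      rw [pv_takeWhile_len _ hsort i hge, List.count_filter (by simp), hperm.count_eq]
    show countPerms3LoopA _ (i :: _) _ _ = countPerms3LoopB (i :: _) _ _ _
    rw [countPerms3LoopA, countPerms3LoopB]
    simp only [pv_dropWhile_lt s hs t i ht, hcntA, hcntB]
    by_cases hc : cards + (cv.count i : Int) ≤ i
    · simp [hc]
    · simp only [hc, if_false]
      rw [pv_dropWhile_eq _ hsort i hge, List.filter_filter]
      have hfe : (fun v => decide (i + 1 ≤ v) && decide (i ≤ v))
          = (fun v => decide (i + 1 ≤ v)) := by
        funext v
        by_cases h1 : i + 1 ≤ v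
        · simp [h1]; omega
        · simp [h1]
      rw [hfe]
      have harith : i + (k + 1 : Nat) = (i + 1) + (k : Nat) := by push_cast; ring
      rw [harith, ih (i + 1) (i + 1) _ _ le_rfl]

-- ===== VERDICT (by name: the statement is the Claim_ definition above) =====
theorem count_perms3_spec : Claim_equal_count_perms3 := by
  intro vals hdom
  unfold Spec_count_perms3 count_perms3 count_perms3_alt
  set s := PySem.List.sorted vals (fun x => x) false with hsdef
  have hperm : s.Perm vals := PySem.List.sorted_perm vals _ false
  have hs : s.Pairwise (· ≤ ·) := by
    simpa using PySem.List.sorted_pairwise vals (fun x => x)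
  have hself : s.filter (fun v => decide ((-2147483648 : Int) ≤ v)) = s := by
    apply pv_filter_ge_eq_self
    intro v hv
    have hv' : v ∈ vals := hperm.mem_iff.mp hv
    have := (List.all_eq_true.mp hdom) v hv'
    simp [pvDomInt] at this
    omega
  have := pv_main s vals hs hperm vals.length 0 (-2147483648) 0 1 (by omega)
  simpa [hself] using this
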